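-- pv_equiv track=rewrite | github.com/30mb1/HSE_homework | homework-MO/1/homework-practice-01-AlievMagomed/functions.py | max_after_zero
-- ===== SOURCE A (Python) =====
-- def max_after_zero(x):
--     max_ = 0
--
--     for idx, elem in enumerate(x):
--         try:
--             if elem == 0 and x[idx + 1] >= max_:
--                 max_ = x[idx + 1]
--         except IndexError:
--             # we reached array end
--             pass
--
--     return max_
-- ===== SOURCE B (Python) =====
-- def max_after_zero(x):
--     best = 0
--     rest = x
--     for _ in range(x.count(0)):
--         i = rest.index(0)
--         if i + 1 < len(rest) and rest[i + 1] > best: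
--             best = rest[i + 1]
--         rest = rest[i + 1:]
--     return best
-- ===== Notes on version B (the rewrite author's own statement) =====
-- stated objective: alternative
-- what changed: Instead of A's per-element enumerate loop with try/except indexing and a running accumulator, B counts the zeros once and then jumps directly from zero to zero with list.index, inspecting only each zero's successor and discarding the processed prefix.
import Mathlib
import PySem

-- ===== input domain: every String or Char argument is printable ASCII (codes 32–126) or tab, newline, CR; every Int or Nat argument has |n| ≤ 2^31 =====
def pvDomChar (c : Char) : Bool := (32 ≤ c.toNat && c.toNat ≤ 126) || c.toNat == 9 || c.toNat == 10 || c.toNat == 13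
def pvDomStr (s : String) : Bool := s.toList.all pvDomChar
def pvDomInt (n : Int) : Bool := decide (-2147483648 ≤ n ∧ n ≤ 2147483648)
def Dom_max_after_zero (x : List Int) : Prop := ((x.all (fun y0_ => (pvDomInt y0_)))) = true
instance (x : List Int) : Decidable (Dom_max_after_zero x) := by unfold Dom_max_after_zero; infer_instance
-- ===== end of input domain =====

-- B replaces A's per-element enumerate loop (try/except + running accumulator) by a
-- zero-jumping scan: count the zeros once, then repeatedly locate the next zero with
-- list.index, look only at its successor, and drop the processed prefix.

-- ===== PORT A =====
def max_after_zero (x : List Int) : Int :=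
  (PySem.List.enumerate x 0).foldl
    (fun max_ (p : Int × Int) =>
      if p.2 == 0 then
        match PySem.List.pyGet? x (p.1 + 1) with
        | some v => if v ≥ max_ then v else max_   -- x[idx+1] >= max_  →  max_ = x[idx+1]
        | none => max_                             -- IndexError: pass
      else max_) 0

-- ===== PORT B =====
-- the `for _ in range(x.count(0))` loop: fuel = number of zeros still to process
def pvBLoop : Nat → Int → List Int → Int
  | 0, best, _ => best
  | n + 1, best, rest =>
    match PySem.List.index? rest 0 with
    | none => best                                 -- unreachable: fuel counts the zeros present
    | some i =>
      let best' := if i + 1 < rest.length then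
                     (if rest.getD (i + 1) 0 > best then rest.getD (i + 1) 0 else best)
                   else best                       -- if i+1 < len(rest) and rest[i+1] > best
      pvBLoop n best' (rest.drop (i + 1))          -- rest = rest[i+1:]

def max_after_zero_alt (x : List Int) : Int :=
  pvBLoop (PySem.List.count x 0) 0 x

-- ===== PRECONDITION & SPEC =====
def Spec_max_after_zero (x : List Int) (out : Int) : Prop := out = max_after_zero_alt x
instance (x : List Int) (out : Int) : Decidable (Spec_max_after_zero x out) := by unfold Spec_max_after_zero; infer_instance

-- ===== CLAIM (what is proved, stated in full; the proofs are below) =====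
def Claim_equal_max_after_zero : Prop := ∀ (x : List Int), Dom_max_after_zero x → Spec_max_after_zero x (max_after_zero x)

-- ===== LEMMAS AND PROOFS =====

-- Both programs reduce to this fold over the list of consecutive pairs.
def pvStep (m : Int) (q : Int × Int) : Int := if q.1 = 0 then max m q.2 else m

-- A's loop over `enumerate`, with the lookups shifted by the processed prefix `pre`,
-- is the pair fold.
lemma loopA_eq (t : List Int) : ∀ (pre : List Int) (m : Int),
    (PySem.List.enumerate t (pre.length : Int)).foldl
      (fun max_ p =>
        if p.2 == 0 then
          match PySem.List.pyGet? (pre ++ t) (p.1 + 1) with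
          | some v => if v ≥ max_ then v else max_
          | none => max_
        else max_) m
    = (t.zip (t.drop 1)).foldl pvStep m := by
  induction t with
  | nil => intro pre m; simp [PySem.List.enumerate]
  | cons e u ih =>
    intro pre m
    rw [PySem.List.enumerate_cons]
    have hx : pre ++ e :: u = (pre ++ [e]) ++ u := by simp
    have hidx : ((pre.length : Int) + 1) = ((pre ++ [e]).length : Int) + ((0 : Nat) : Int) := by
      simp
    have hstart : ((pre.length : Int) + 1) = (((pre ++ [e]).length : Nat) : Int) := by simp
    rw [List.foldl_cons]
    have hget : PySem.List.pyGet? (pre ++ e :: u) ((pre.length : Int) + 1) = u[0]? := by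
      rw [hx, hidx, PySem.List.pyGet?_append_right]
    cases u with
    | nil =>
      simp only [hget]
      simp [PySem.List.enumerate]
    | cons b v =>
      have hrec := ih (pre ++ [e])
        (if (e == 0) = true then
          match PySem.List.pyGet? (pre ++ e :: b :: v) ((pre.length : Int) + 1) with
          | some w => if w ≥ m then w else m
          | none => m
        else m)
      rw [hstart, hx] at *
      rw [hrec]
      have hstep : (if (e == 0) = true then
          match PySem.List.pyGet? ((pre ++ [e]) ++ b :: v) ((((pre ++ [e]).length : Nat) : Int)) with
          | some w => if w ≥ m then w else m
          | none => m
        else m) = pvStep m (e, b) := by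
        have h0 : PySem.List.pyGet? ((pre ++ [e]) ++ b :: v) ((((pre ++ [e]).length : Nat) : Int)) = some b := by
          have := PySem.List.pyGet?_append_right (pre ++ [e]) (b :: v) 0
          simpa using this
        rw [h0]
        by_cases he : e = 0
        · simp [pvStep, he, max_def]
        · simp [pvStep, he]
      rw [hstep]
      rfl

-- a zero-free list contributes nothing to the pair fold
lemma pairFold_no_zero : ∀ (l : List Int) (m : Int), (0 : Int) ∉ l →
    (l.zip (l.drop 1)).foldl pvStep m = m := by
  intro l
  induction l with
  | nil => intro m _; rfl
  | cons a t ih =>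
    intro m h
    cases t with
    | nil => rfl
    | cons b u =>
      have ha : a ≠ 0 := fun e => h (by simp [e])
      have ht : (0 : Int) ∉ b :: u := fun e => h (List.mem_cons_of_mem _ e)
      simp [pvStep, ha]
      exact ih m ht

-- skipping a zero-free prefix leaves the pair fold unchanged
lemma pairFold_skip_prefix : ∀ (pre suf : List Int) (m : Int), (0 : Int) ∉ pre →
    ((pre ++ 0 :: suf).zip ((pre ++ 0 :: suf).drop 1)).foldl pvStep m
    = ((0 :: suf).zip ((0 :: suf).drop 1)).foldl pvStep m := by
  intro pre
  induction pre with
  | nil => intro suf m _; rfl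
  | cons a p ih =>
    intro suf m h
    have ha : a ≠ 0 := fun e => h (by simp [e])
    have hp : (0 : Int) ∉ p := fun e => h (List.mem_cons_of_mem _ e)
    cases p with
    | nil => simpa [pvStep, ha] using ih suf m hp
    | cons c q => simpa [pvStep, ha] using ih suf m hp

-- B's fuelled zero-jumping loop computes the pair fold
lemma loopB_eq : ∀ (n : Nat) (rest : List Int) (m : Int), rest.count 0 = n →
    pvBLoop n m rest = (rest.zip (rest.drop 1)).foldl pvStep m := by
  intro n
  induction n with
  | zero =>
    intro rest m h
    exact (pairFold_no_zero rest m (List.count_eq_zero.mp h)).symm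
  | succ n ih =>
    intro rest m h
    have hmem : (0 : Int) ∈ rest := by
      by_contra hn
      rw [List.count_eq_zero_of_not_mem hn] at h; omega
    obtain ⟨i, hi⟩ := Option.isSome_iff_exists.mp
      ((PySem.List.index?_isSome_iff rest 0).mpr hmem)
    obtain ⟨pre, suf, hsplit, hlen, hpre⟩ := (PySem.List.index?_eq_some_iff rest 0 i).mp hi
    have hdrop : rest.drop (i + 1) = suf := by
      subst hsplit; rw [← hlen]
      simp
    have hcount : suf.count 0 = n := by
      subst hsplit
      have h0 : pre.count (0 : Int) = 0 := List.count_eq_zero.mpr hpre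
      simp [List.count_append, h0] at h
      omega
    have hfold : ((rest.zip (rest.drop 1)).foldl pvStep m)
        = ((0 :: suf).zip ((0 :: suf).drop 1)).foldl pvStep m := by
      subst hsplit; exact pairFold_skip_prefix pre suf m hpre
    have hL : rest.length = pre.length + suf.length + 1 := by
      subst hsplit; simp; omega
    simp only [pvBLoop, hi]
    cases suf with
    | nil =>
      have hlt : ¬ (i + 1 < rest.length) := by simp at hL; omega
      have hn : n = 0 := by simpa using hcount.symm
      subst hn
      rw [hfold]
      simp [hlt, pvBLoop]
    | cons b u =>
      have hlt : i + 1 < rest.length := by simp at hL; omega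
      have hgetd : rest.getD (i + 1) 0 = b := by
        subst hsplit
        rw [← hlen, List.getD_eq_getElem?_getD]
        simp
      rw [hfold]
      have hrhs : ((0 :: b :: u).zip ((0 :: b :: u).drop 1)).foldl pvStep m
          = ((b :: u).zip ((b :: u).drop 1)).foldl pvStep (max m b) := by
        simp [pvStep]
      rw [hrhs, hdrop]
      rw [ih (b :: u) _ hcount]
      congr 1
      simp only [hlt, if_true, hgetd]
      omega

-- ===== VERDICT (by name: the statement is the Claim_ definition above) =====
theorem max_after_zero_spec : Claim_equal_max_after_zero := by
  intro x _
  show max_after_zero x = max_after_zero_alt x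
  simp only [max_after_zero, max_after_zero_alt]
  rw [PySem.List.count_eq]
  rw [loopB_eq (x.count 0) x 0 rfl]
  have := loopA_eq x [] 0
  simpa using this
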